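-- pv_equiv track=rewrite | github.com/cr8ivecodesmith/raggd | src/raggd/cli/parser.py | _split_target_tokens
-- ===== SOURCE A (Python) =====
-- from typing import Any, Iterable, Iterator, List, Sequence
--
-- def _split_target_tokens(
--     tokens: Sequence[str] | None,
--     available: Iterable[str],
-- ) -> tuple[list[str], list[str]]:
--     known = set(available)
--     selected: list[str] = []
--     scope_tokens: list[str] = []
--     unknown_mode = False
--     for token in tokens or ():
--         value = token.strip()
--         if not value:
--             continue
--         if not unknown_mode and value in known:
--             selected.append(value)
--             continue
--         unknown_mode = True
--         scope_tokens.append(value)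
--     return selected, scope_tokens
-- ===== SOURCE B (Python) =====
-- def _split_target_tokens(tokens, available):
--     known = set(available)
--     cleaned = [v for v in (t.strip() for t in tokens or ()) if v]
--     split = next((i for i, v in enumerate(cleaned) if v not in known), len(cleaned))
--     return cleaned[:split], cleaned[split:]
-- ===== Notes on version B (the rewrite author's own statement) =====
-- stated objective: simpler
-- what changed: Replaces A's stateful single pass with an unknown_mode flag by a clean-then-find-first-unknown-then-slice decomposition with no running flag.
import Mathlib
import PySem

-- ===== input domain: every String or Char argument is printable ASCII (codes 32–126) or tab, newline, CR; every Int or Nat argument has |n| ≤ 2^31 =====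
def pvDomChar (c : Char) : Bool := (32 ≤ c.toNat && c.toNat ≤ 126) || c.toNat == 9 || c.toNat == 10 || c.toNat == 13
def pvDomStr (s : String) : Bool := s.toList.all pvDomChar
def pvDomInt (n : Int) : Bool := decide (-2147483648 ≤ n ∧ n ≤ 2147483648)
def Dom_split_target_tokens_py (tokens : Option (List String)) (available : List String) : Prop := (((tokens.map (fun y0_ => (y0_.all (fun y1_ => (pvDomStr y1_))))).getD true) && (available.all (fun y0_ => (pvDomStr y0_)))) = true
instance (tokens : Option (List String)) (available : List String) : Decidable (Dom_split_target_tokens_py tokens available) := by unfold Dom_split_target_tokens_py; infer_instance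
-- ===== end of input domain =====

-- B changes the decomposition (clean, find first unknown, slice) instead of A's flag-carrying single pass; objective: simpler.

-- ===== PORT A =====
-- A's loop body, one step over the state (selected, scope_tokens, unknown_mode)
def pvStepA (known : PySem.Set String) (st : List String × List String × Bool) (token : String) : List String × List String × Bool :=
  let value := PySem.Str.strip token
  if value == "" then st
  else if !st.2.2 && PySem.Set.contains known value then (st.1 ++ [value], st.2.1, st.2.2)
  else (st.1, st.2.1 ++ [value], true)

def split_target_tokens_py (tokens : Option (List String)) (available : List String) : List String × List String :=
  let known := PySem.Set.ofList available
  let r := (tokens.getD []).foldl (pvStepA known) ([], [], false)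
  (r.1, r.2.1)

-- ===== PORT B =====
def split_target_tokens_py_alt (tokens : Option (List String)) (available : List String) : List String × List String :=
  let known := PySem.Set.ofList available
  let cleaned := ((tokens.getD []).map PySem.Str.strip).filter (fun v => !(v == ""))
  let split := cleaned.findIdx (fun v => !(PySem.Set.contains known v))
  (cleaned.take split, cleaned.drop split)

-- ===== PRECONDITION & SPEC =====
def Spec_split_target_tokens_py (tokens : Option (List String)) (available : List String) (out : List String × List String) : Prop := out = split_target_tokens_py_alt tokens available
instance (tokens : Option (List String)) (available : List String) (out : List String × List String) : Decidable (Spec_split_target_tokens_py tokens available out) := by unfold Spec_split_target_tokens_py; infer_instance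

-- ===== CLAIM (what is proved, stated in full; the proofs are below) =====
def Claim_equal_split_target_tokens_py : Prop := ∀ (tokens : Option (List String)) (available : List String), Dom_split_target_tokens_py tokens available → Spec_split_target_tokens_py tokens available (split_target_tokens_py tokens available)

-- ===== LEMMAS AND PROOFS =====

-- the cleaned token list both programs effectively work over
def pvClean (l : List String) : List String :=
  (l.map PySem.Str.strip).filter (fun v => !(v == ""))

-- B's slice-at-findIdx equals takeWhile/dropWhile of the "known" predicate
theorem pvB_take (p : String → Bool) (c : List String) :
    c.take (c.findIdx (fun v => !p v)) = c.takeWhile p := by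
  induction c with
  | nil => simp
  | cons v t ih =>
    by_cases hv : p v
    · simp [List.findIdx_cons, hv, ih]
    · simp [List.findIdx_cons, hv]

theorem pvB_drop (p : String → Bool) (c : List String) :
    c.drop (c.findIdx (fun v => !p v)) = c.dropWhile p := by
  induction c with
  | nil => simp
  | cons v t ih =>
    by_cases hv : p v
    · simp [List.findIdx_cons, hv, ih]
    · simp [List.findIdx_cons, hv]

-- A's fold once unknown_mode is true just appends every cleaned token to scope
theorem pvA_true (known : PySem.Set String) (l : List String) (sel sc : List String) :
    l.foldl (pvStepA known) (sel, sc, true) = (sel, sc ++ pvClean l, true) := by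
  induction l generalizing sc with
  | nil => simp [pvClean]
  | cons t l ih =>
    by_cases h : PySem.Str.strip t == ""
    · simp [List.foldl_cons, pvStepA, h, ih, pvClean]
    · simp [List.foldl_cons, pvStepA, h, ih, pvClean]

-- A's fold from unknown_mode = false computes takeWhile/dropWhile of the cleaned list
theorem pvA_false (known : PySem.Set String) (l : List String) (sel : List String) :
    l.foldl (pvStepA known) (sel, [], false)
      = (sel ++ (pvClean l).takeWhile (fun v => PySem.Set.contains known v),
         (pvClean l).dropWhile (fun v => PySem.Set.contains known v),
         !((pvClean l).dropWhile (fun v => PySem.Set.contains known v)).isEmpty) := by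
  induction l generalizing sel with
  | nil => simp [pvClean]
  | cons t l ih =>
    by_cases h : PySem.Str.strip t == ""
    · simp [List.foldl_cons, pvStepA, h, ih, pvClean]
    · by_cases hk : PySem.Str.strip t ∈ known
      · simp [List.foldl_cons, pvStepA, PySem.Set.contains, h, hk, ih, pvClean]
      · simp [List.foldl_cons, pvStepA, PySem.Set.contains, h, hk, pvA_true, pvClean]

-- ===== VERDICT (by name: the statement is the Claim_ definition above) =====
theorem split_target_tokens_py_spec : Claim_equal_split_target_tokens_py := by
  intro tokens available _
  show _ = _
  unfold split_target_tokens_py split_target_tokens_py_alt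
  simp only [pvA_false (PySem.Set.ofList available) (tokens.getD []) []]
  have h1 := pvB_take (fun v => PySem.Set.contains (PySem.Set.ofList available) v)
    (pvClean (tokens.getD []))
  have h2 := pvB_drop (fun v => PySem.Set.contains (PySem.Set.ofList available) v)
    (pvClean (tokens.getD []))
  simp only [pvClean] at h1 h2
  simp at h1 h2 ⊢
  exact ⟨h1.symm, h2.symm⟩
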